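-- pv_equiv track=rewrite | github.com/nkllon/kiro-ai-development-hackathon | scripts/rule_firing_identifier.py | _operation_matches_rule
-- ===== SOURCE A (Python) =====
-- def _operation_matches_rule(rule_name: str, operation: str) -> bool:
--     """Check if operation matches rule purpose"""
--     operation_lower = operation.lower()
--
--     # Map operations to rules
--     operation_rule_mapping = {
--         "git": ["make_first_enforcement", "pr_procedure_enforcement"],
--         "security": ["security"],
--         "linting": ["python_quality_enforcement", "intelligent_linter_prevention"],
--         "formatting": ["deterministic_editing", "python_quality_enforcement"],
--         "package": ["package_management_uv"],
--         "testing": ["ghostbusters", "call_more_ghostbusters"],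
--         "model": ["model_first_enforcement", "model_driven_enforcement"],
--         "cleanup": ["cleanup_before_next_thing"],
--         "investigation": ["investigation_analysis", "intelligent_policy"],
--     }
--
--     for op_key, rule_list in operation_rule_mapping.items():
--         if op_key in operation_lower:
--             if rule_name in rule_list:
--                 return True
--
--     return False
-- ===== SOURCE B (Python) =====
-- # B: reverse index rule_name -> trigger keywords; one lookup + any() over that rule's keywords
-- # (idiomatic; same result as scanning all nine operation->rules entries).
--
-- _RULE_TRIGGERS = {
--     "make_first_enforcement": ["git"],
--     "pr_procedure_enforcement": ["git"],
--     "security": ["security"],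
--     "python_quality_enforcement": ["linting", "formatting"],
--     "intelligent_linter_prevention": ["linting"],
--     "deterministic_editing": ["formatting"],
--     "package_management_uv": ["package"],
--     "ghostbusters": ["testing"],
--     "call_more_ghostbusters": ["testing"],
--     "model_first_enforcement": ["model"],
--     "model_driven_enforcement": ["model"],
--     "cleanup_before_next_thing": ["cleanup"],
--     "investigation_analysis": ["investigation"],
--     "intelligent_policy": ["investigation"],
-- }
--
--
-- def _operation_matches_rule(rule_name: str, operation: str) -> bool:
--     """Check if operation matches rule purpose"""
--     operation_lower = operation.lower()
--     return any(op_key in operation_lower for op_key in _RULE_TRIGGERS.get(rule_name, ()))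
-- ===== Notes on version B (the rewrite author's own statement) =====
-- stated objective: idiomatic
-- what changed: B replaces the scan over all nine operation->rules mapping entries by a precomputed reverse index rule_name -> trigger keywords, doing one dict lookup and an any() over only that rule's keywords (OR semantics preserved for rules listed under two keywords).
import Mathlib
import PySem

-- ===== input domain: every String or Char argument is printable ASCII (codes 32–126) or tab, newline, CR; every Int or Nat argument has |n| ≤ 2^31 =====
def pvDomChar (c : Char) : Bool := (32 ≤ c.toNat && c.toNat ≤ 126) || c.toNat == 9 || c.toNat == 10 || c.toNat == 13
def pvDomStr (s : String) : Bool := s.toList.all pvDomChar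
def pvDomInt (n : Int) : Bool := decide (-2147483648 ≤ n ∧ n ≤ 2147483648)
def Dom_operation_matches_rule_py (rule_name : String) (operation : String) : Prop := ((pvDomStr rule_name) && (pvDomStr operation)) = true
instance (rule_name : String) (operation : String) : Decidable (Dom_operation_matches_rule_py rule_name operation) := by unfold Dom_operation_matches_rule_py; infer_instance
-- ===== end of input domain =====

-- B replaces A's scan over all nine operation->rules entries by a reverse index rule_name -> trigger keywords (idiomatic).

-- ===== PORT A =====
def pvMappingA : List (String × List String) :=
  [("git", ["make_first_enforcement", "pr_procedure_enforcement"]),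
   ("security", ["security"]),
   ("linting", ["python_quality_enforcement", "intelligent_linter_prevention"]),
   ("formatting", ["deterministic_editing", "python_quality_enforcement"]),
   ("package", ["package_management_uv"]),
   ("testing", ["ghostbusters", "call_more_ghostbusters"]),
   ("model", ["model_first_enforcement", "model_driven_enforcement"]),
   ("cleanup", ["cleanup_before_next_thing"]),
   ("investigation", ["investigation_analysis", "intelligent_policy"])]

-- the 'for op_key, rule_list in …: if op_key in operation_lower: if rule_name in rule_list: return True' loop
def pvLoopA (rule_name operation_lower : String) : List (String × List String) → Bool
  | [] => false
  | (op_key, rule_list) :: rest =>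
    if PySem.Str.isIn op_key operation_lower then
      (if rule_list.contains rule_name then true
       else pvLoopA rule_name operation_lower rest)
    else pvLoopA rule_name operation_lower rest

def operation_matches_rule_py (rule_name : String) (operation : String) : Bool :=
  pvLoopA rule_name (PySem.Str.lower operation) pvMappingA

-- ===== PORT B =====
def pvRuleTriggers : PySem.Dict String (List String) := PySem.Dict.mk
  [("make_first_enforcement", ["git"]),
   ("pr_procedure_enforcement", ["git"]),
   ("security", ["security"]),
   ("python_quality_enforcement", ["linting", "formatting"]),
   ("intelligent_linter_prevention", ["linting"]),
   ("deterministic_editing", ["formatting"]),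
   ("package_management_uv", ["package"]),
   ("ghostbusters", ["testing"]),
   ("call_more_ghostbusters", ["testing"]),
   ("model_first_enforcement", ["model"]),
   ("model_driven_enforcement", ["model"]),
   ("cleanup_before_next_thing", ["cleanup"]),
   ("investigation_analysis", ["investigation"]),
   ("intelligent_policy", ["investigation"])]

def operation_matches_rule_py_alt (rule_name : String) (operation : String) : Bool :=
  let operation_lower := PySem.Str.lower operation
  (PySem.Dict.getD pvRuleTriggers rule_name []).any
    (fun op_key => PySem.Str.isIn op_key operation_lower)

-- ===== PRECONDITION & SPEC =====
def Spec_operation_matches_rule_py (rule_name : String) (operation : String) (out : Bool) : Prop := out = operation_matches_rule_py_alt rule_name operation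
instance (rule_name : String) (operation : String) (out : Bool) : Decidable (Spec_operation_matches_rule_py rule_name operation out) := by unfold Spec_operation_matches_rule_py; infer_instance

-- ===== CLAIM (what is proved, stated in full; the proofs are below) =====
def Claim_equal_operation_matches_rule_py : Prop := ∀ (rule_name : String) (operation : String), Dom_operation_matches_rule_py rule_name operation → Spec_operation_matches_rule_py rule_name operation (operation_matches_rule_py rule_name operation)

-- ===== LEMMAS AND PROOFS =====

-- Both programs, for fixed rule_name, reduce to a disjunction of substring tests; for each of
-- the 14 indexed rule names (and for any other rule_name) the two disjunctions coincide.
theorem pv_key (rule_name operation_lower : String) :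
    pvLoopA rule_name operation_lower pvMappingA =
      (PySem.Dict.getD pvRuleTriggers rule_name []).any
        (fun op_key => PySem.Str.isIn op_key operation_lower) := by
  by_cases h1 : "make_first_enforcement" = rule_name
  · subst h1; simp [pvLoopA, pvMappingA, pvRuleTriggers, PySem.Dict.getD, PySem.Dict.get?]
  by_cases h2 : "pr_procedure_enforcement" = rule_name
  · subst h2; simp [pvLoopA, pvMappingA, pvRuleTriggers, PySem.Dict.getD, PySem.Dict.get?]
  by_cases h3 : "security" = rule_name
  · subst h3; simp [pvLoopA, pvMappingA, pvRuleTriggers, PySem.Dict.getD, PySem.Dict.get?]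
  by_cases h4 : "python_quality_enforcement" = rule_name
  · subst h4; simp [pvLoopA, pvMappingA, pvRuleTriggers, PySem.Dict.getD, PySem.Dict.get?]
  by_cases h5 : "intelligent_linter_prevention" = rule_name
  · subst h5; simp [pvLoopA, pvMappingA, pvRuleTriggers, PySem.Dict.getD, PySem.Dict.get?]
  by_cases h6 : "deterministic_editing" = rule_name
  · subst h6; simp [pvLoopA, pvMappingA, pvRuleTriggers, PySem.Dict.getD, PySem.Dict.get?]
  by_cases h7 : "package_management_uv" = rule_name
  · subst h7; simp [pvLoopA, pvMappingA, pvRuleTriggers, PySem.Dict.getD, PySem.Dict.get?]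
  by_cases h8 : "ghostbusters" = rule_name
  · subst h8; simp [pvLoopA, pvMappingA, pvRuleTriggers, PySem.Dict.getD, PySem.Dict.get?]
  by_cases h9 : "call_more_ghostbusters" = rule_name
  · subst h9; simp [pvLoopA, pvMappingA, pvRuleTriggers, PySem.Dict.getD, PySem.Dict.get?]
  by_cases h10 : "model_first_enforcement" = rule_name
  · subst h10; simp [pvLoopA, pvMappingA, pvRuleTriggers, PySem.Dict.getD, PySem.Dict.get?]
  by_cases h11 : "model_driven_enforcement" = rule_name
  · subst h11; simp [pvLoopA, pvMappingA, pvRuleTriggers, PySem.Dict.getD, PySem.Dict.get?]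
  by_cases h12 : "cleanup_before_next_thing" = rule_name
  · subst h12; simp [pvLoopA, pvMappingA, pvRuleTriggers, PySem.Dict.getD, PySem.Dict.get?]
  by_cases h13 : "investigation_analysis" = rule_name
  · subst h13; simp [pvLoopA, pvMappingA, pvRuleTriggers, PySem.Dict.getD, PySem.Dict.get?]
  by_cases h14 : "intelligent_policy" = rule_name
  · subst h14; simp [pvLoopA, pvMappingA, pvRuleTriggers, PySem.Dict.getD, PySem.Dict.get?]
  · simp [pvLoopA, pvMappingA, pvRuleTriggers, PySem.Dict.getD, PySem.Dict.get?, h1, h2, h3, h4, h5, h6, h7, h8, h9, h10, h11, h12, h13, h14,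
      Ne.symm h1, Ne.symm h2, Ne.symm h3, Ne.symm h4, Ne.symm h5, Ne.symm h6, Ne.symm h7,
      Ne.symm h8, Ne.symm h9, Ne.symm h10, Ne.symm h11, Ne.symm h12, Ne.symm h13, Ne.symm h14]

-- ===== VERDICT (by name: the statement is the Claim_ definition above) =====
theorem operation_matches_rule_py_spec : Claim_equal_operation_matches_rule_py := by
  intro rule_name operation _
  unfold Spec_operation_matches_rule_py operation_matches_rule_py operation_matches_rule_py_alt
  exact pv_key rule_name (PySem.Str.lower operation)
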